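-- pv_equiv track=rewrite | github.com/pokerdio/generic | euler/euler-172.py | go
-- ===== SOURCE A (Python) =====
-- def expand(poz):
--     threes, twos, ones, zeros = poz
--
--     s = 0
--     if threes:
--         yield (threes - 1, twos + 1, ones, zeros), threes
--     if twos:
--         yield (threes, twos - 1, ones + 1, zeros), twos
--     if ones:
--         yield (threes, twos, ones - 1, zeros + 1), ones
--
-- def go(digitz):
--     assert(digitz > 1)
--
--     v = {(9, 1, 0, 0): 9}  # 9 options for the first digit (0 excluded)
--
--     for _ in range(digitz - 1):
--         v2 = {}
--         for poz, count in v.items():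
--             for poz2, count2 in expand(poz):
--                 v2[poz2] = v2.get(poz2, 0) + count * count2
--
--         v = v2
--     return sum(list(v.values()))
-- ===== SOURCE B (Python) =====
-- def _choose(n, k):
--     r = 1
--     for i in range(k):
--         r = r * (n - i) // (i + 1)
--     return r
--
-- def _fact(m):
--     r = 1
--     for i in range(2, m + 1):
--         r *= i
--     return r
--
-- def _count(m, d):
--     # sequences of length m over d symbols, each symbol used at most 3 times
--     total = 0
--     for c in range(d + 1):
--         for b in range(d + 1 - c):
--             a = m - 2 * b - 3 * c
--             if 0 <= a <= d - c - b:
--                 total += _choose(d, c) * _choose(d - c, b) * _choose(d - c - b, a) * _fact(m) // (2 ** b * 6 ** c)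
--     return total
--
-- def go(digitz):
--     assert digitz > 1
--     lead0 = 0
--     for j in range(3):
--         if j <= digitz - 1:
--             lead0 += _choose(digitz - 1, j) * _count(digitz - 1 - j, 9)
--     return _count(digitz, 10) - lead0
-- ===== Notes on version B (the rewrite author's own statement) =====
-- stated objective: faster
-- what changed: Replaces the per-digit dict-of-states DP iterated digitz-1 times by a closed-form combinatorial count: a bounded double sum of multinomial terms (choose which digits are used 1/2/3 times and arrange positions), minus the same count for a forced leading zero.
import Mathlib
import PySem

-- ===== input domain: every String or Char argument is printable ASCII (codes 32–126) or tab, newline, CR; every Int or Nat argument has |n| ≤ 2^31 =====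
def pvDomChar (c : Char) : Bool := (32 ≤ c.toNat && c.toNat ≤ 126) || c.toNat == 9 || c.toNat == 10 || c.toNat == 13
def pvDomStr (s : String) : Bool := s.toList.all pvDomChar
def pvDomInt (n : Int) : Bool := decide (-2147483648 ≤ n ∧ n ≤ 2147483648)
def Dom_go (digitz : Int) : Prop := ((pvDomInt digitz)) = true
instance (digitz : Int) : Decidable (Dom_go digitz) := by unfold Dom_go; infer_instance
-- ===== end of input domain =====

-- B replaces the O(digitz) state-transition iteration by a closed-form multinomial count
-- (constant number of arithmetic terms): objective = faster (asymptotic, O(n) -> O(1) loop count).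


-- ===== PORT A =====
-- state (threes, twos, ones, zeros); generator becomes a list of up-to-3 yielded pairs
def expandA (poz : Int × Int × Int × Int) : List ((Int × Int × Int × Int) × Int) :=
  let (threes, twos, ones, zeros) := poz
  (if threes ≠ 0 then [((threes - 1, twos + 1, ones, zeros), threes)] else []) ++
  (if twos ≠ 0 then [((threes, twos - 1, ones + 1, zeros), twos)] else []) ++
  (if ones ≠ 0 then [((threes, twos, ones - 1, zeros + 1), ones)] else [])

-- one iteration of A's `for _ in range(digitz - 1)` body
def goStep (v : PySem.Dict (Int × Int × Int × Int) Int) : PySem.Dict (Int × Int × Int × Int) Int :=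
  v.items.foldl (fun v2 pc =>
    (expandA pc.1).foldl (fun v2 pc2 =>
      v2.insert pc2.1 (v2.getD pc2.1 0 + pc.2 * pc2.2)) v2)
    PySem.Dict.empty

def go (digitz : Int) : Int :=
  (((PySem.List.pyRange 0 (digitz - 1) 1).foldl (fun v _ => goStep v)
      (PySem.Dict.empty.insert (9, 1, 0, 0) 9)).values).sum

-- ===== PORT B =====
-- r = 1; for i in range(k): r = r * (n - i) // (i + 1)
def chooseB (n k : Int) : Int :=
  (PySem.List.pyRange 0 k 1).foldl (fun r i => PySem.Int.floordiv (r * (n - i)) (i + 1)) 1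

-- r = 1; for i in range(2, m+1): r *= i
def factB (m : Int) : Int :=
  (PySem.List.pyRange 2 (m + 1) 1).foldl (fun r i => r * i) 1

-- Python `2 ** b` / `6 ** c` with b, c drawn from range(...), hence ≥ 0: exact via .toNat
def countB (m d : Int) : Int :=
  (PySem.List.pyRange 0 (d + 1) 1).foldl (fun total c =>
    (PySem.List.pyRange 0 (d + 1 - c) 1).foldl (fun total b =>
      let a := m - 2 * b - 3 * c
      if 0 ≤ a ∧ a ≤ d - c - b then
        total + PySem.Int.floordiv
          (chooseB d c * chooseB (d - c) b * chooseB (d - c - b) a * factB m)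
          ((2 : Int) ^ b.toNat * (6 : Int) ^ c.toNat)
      else total) total) 0

def go_alt (digitz : Int) : Int :=
  let lead0 := (PySem.List.pyRange 0 3 1).foldl (fun lead0 j =>
    if j ≤ digitz - 1 then lead0 + chooseB (digitz - 1) j * countB (digitz - 1 - j) 9
    else lead0) 0
  countB digitz 10 - lead0

-- ===== PRECONDITION & SPEC =====
-- A's `assert digitz > 1` raises AssertionError for digitz ≤ 1
def Pre_go (digitz : Int) : Prop := 2 ≤ digitz
instance (digitz : Int) : Decidable (Pre_go digitz) := by unfold Pre_go; infer_instance
def pvWitness_go : Int := 5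

def Spec_go (digitz : Int) (out : Int) : Prop := out = go_alt digitz
instance (digitz : Int) (out : Int) : Decidable (Spec_go digitz out) := by unfold Spec_go; infer_instance

-- ===== CLAIM (what is proved, stated in full; the proofs are below) =====
def Claim_equal_go : Prop := ∀ (digitz : Int), Dom_go digitz → Pre_go digitz → Spec_go digitz (go digitz)

-- ===== LEMMAS AND PROOFS =====

theorem foldl_id_of_mem {α β : Type} (l : List α) (f : β → α → β) (init : β)
    (h : ∀ acc x, x ∈ l → f acc x = acc) : l.foldl f init = init := by
  induction l generalizing init with
  | nil => rfl
  | cons a t ih =>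
    simp only [List.foldl_cons]
    rw [h init a (by simp)]
    exact ih init (fun acc x hx => h acc x (by simp [hx]))

theorem foldl_const_eq_iterate {α β : Type} (l : List α) (f : β → β) (x : β) :
    l.foldl (fun v _ => f v) x = f^[l.length] x := by
  induction l generalizing x with
  | nil => rfl
  | cons a t ih => simp [List.foldl_cons, ih, Function.iterate_succ_apply]

theorem goStep_empty : goStep PySem.Dict.empty = PySem.Dict.empty := rfl

theorem iterate_goStep_empty (k : Nat) :
    goStep^[k] PySem.Dict.empty = PySem.Dict.empty := by
  induction k with
  | zero => rfl
  | succ n ih => rw [Function.iterate_succ_apply, goStep_empty, ih]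

set_option maxRecDepth 100000 in
theorem go_big_zero (digitz : Int) (h : 32 ≤ digitz) : go digitz = 0 := by
  unfold go
  rw [foldl_const_eq_iterate, PySem.List.length_pyRange_one]
  have hm : (digitz - 1 - 0).toNat = ((digitz - 1 - 0).toNat - 30) + 30 := by omega
  rw [hm, Function.iterate_add_apply]
  have h30 : goStep^[30] (PySem.Dict.empty.insert ((9 : Int), (1 : Int), (0 : Int), (0 : Int)) 9)
      = PySem.Dict.empty := by decide
  rw [h30, iterate_goStep_empty]
  rfl

theorem countB_zero (m d : Int) (h : 3 * d < m) : countB m d = 0 := by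
  unfold countB
  apply foldl_id_of_mem
  intro acc c hc
  have hc' := (PySem.List.mem_pyRange_one.mp hc)
  apply foldl_id_of_mem
  intro acc2 b hb
  have hb' := (PySem.List.mem_pyRange_one.mp hb)
  have : ¬ (0 ≤ m - 2 * b - 3 * c ∧ m - 2 * b - 3 * c ≤ d - c - b) := by omega
  simp only [this, if_false]

theorem go_alt_big_zero (digitz : Int) (h : 32 ≤ digitz) : go_alt digitz = 0 := by
  unfold go_alt
  have h10 : countB digitz 10 = 0 := countB_zero _ _ (by omega)
  have h9 : ∀ j : Int, 0 ≤ j → j ≤ 2 → countB (digitz - 1 - j) 9 = 0 := fun j hj hj2 =>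
    countB_zero _ _ (by omega)
  have hr : PySem.List.pyRange 0 3 1 = [0, 1, 2] := by decide
  simp only [hr, List.foldl_cons, List.foldl_nil, h10]
  rw [if_pos (by omega), if_pos (by omega), if_pos (by omega)]
  rw [h9 0 (by omega) (by omega), h9 1 (by omega) (by omega), h9 2 (by omega) (by omega)]
  ring

set_option maxRecDepth 100000 in
set_option maxHeartbeats 4000000 in
theorem go_small (digitz : Int) (h1 : 2 ≤ digitz) (h2 : digitz ≤ 31) :
    go digitz = go_alt digitz := by
  interval_cases digitz <;> decide

-- ===== VERDICT (by name: the statement is the Claim_ definition above) =====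
theorem go_spec : Claim_equal_go := by
  intro digitz _ hpre
  unfold Spec_go
  by_cases h : digitz ≤ 31
  · exact (go_small digitz hpre h).symm ▸ rfl
  · rw [go_big_zero digitz (by omega), go_alt_big_zero digitz (by omega)]
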